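-- pv_equiv track=rewrite | github.com/ChairmanFMao/reply | 2022/new5.py | count_ships
-- ===== SOURCE A (Python) =====
-- def count_ships(seq, directions=(1, 2)):
--     """
--     Count the number of ships in the sequence given.
--     """
--     count = 0
--     last = None
--     for item in seq:
--         if item in directions and item != last:
--             count += 1
--         last = item
--     return count
-- ===== SOURCE B (Python) =====
-- def count_ships(seq, directions=(1, 2)):
--     """Inclusion-exclusion: every direction element counts as a hit; each adjacent
--     equal pair with that value is a duplicate within the same ship, so
--     ships = hits - duplicate pairs (a run of length L gives L hits, L-1 pairs)."""
--     hits = sum(1 for x in seq if x in directions)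
--     dups = sum(1 for a, b in zip(seq, seq[1:]) if a == b and b in directions)
--     return hits - dups
-- ===== Notes on version B (the rewrite author's own statement) =====
-- stated objective: alternative
-- what changed: Replaces the stateful run-start scan with inclusion-exclusion arithmetic: count all elements that are in directions, count adjacent equal pairs whose value is in directions (zip seq with its tail), and return their difference; no remembered 'last' state at all.
import Mathlib
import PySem

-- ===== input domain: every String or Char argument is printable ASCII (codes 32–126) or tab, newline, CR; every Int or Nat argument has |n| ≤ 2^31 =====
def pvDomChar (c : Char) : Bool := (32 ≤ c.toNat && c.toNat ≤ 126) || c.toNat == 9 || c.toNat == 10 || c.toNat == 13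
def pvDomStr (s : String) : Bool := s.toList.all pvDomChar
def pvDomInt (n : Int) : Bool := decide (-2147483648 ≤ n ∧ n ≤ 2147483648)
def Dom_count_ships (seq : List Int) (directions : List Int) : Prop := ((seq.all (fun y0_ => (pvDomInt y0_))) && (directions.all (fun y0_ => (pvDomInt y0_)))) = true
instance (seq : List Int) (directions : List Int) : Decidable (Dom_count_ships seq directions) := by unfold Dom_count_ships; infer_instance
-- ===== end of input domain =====

-- ===== PORT A =====
-- B counts direction hits and subtracts adjacent equal duplicate pairs (inclusion-exclusion)
-- instead of A's stateful last/count run-start scan; objective: alternative decomposition.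
-- A's loop: count, last accumulator over seq.
def count_ships (seq : List Int) (directions : List Int) : Int :=
  (seq.foldl (fun (st : Int × Option Int) item =>
      (if directions.contains item ∧ some item ≠ st.2 then st.1 + 1 else st.1, some item))
    (0, none)).1

-- ===== PORT B =====
-- hits = elements of seq in directions; dups = adjacent equal pairs with value in directions.
def count_ships_alt (seq : List Int) (directions : List Int) : Int :=
  ((seq.filter (fun x => directions.contains x)).length : Int)
  - (((seq.zip seq.tail).filter (fun p => p.1 == p.2 && directions.contains p.2)).length : Int)

-- ===== PRECONDITION & SPEC =====
def Spec_count_ships (seq : List Int) (directions : List Int) (out : Int) : Prop := out = count_ships_alt seq directions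
instance (seq : List Int) (directions : List Int) (out : Int) : Decidable (Spec_count_ships seq directions out) := by unfold Spec_count_ships; infer_instance

-- ===== CLAIM (what is proved, stated in full; the proofs are below) =====
def Claim_equal_count_ships : Prop := ∀ (seq : List Int) (directions : List Int), Dom_count_ships seq directions → Spec_count_ships seq directions (count_ships seq directions)

-- ===== LEMMAS AND PROOFS =====

-- ===== VERDICT (by name: the statement is the Claim_ definition above) =====
-- A's loop with explicit state, as a recursion.
def cntA (directions : List Int) : Option Int → List Int → Int
  | _, [] => 0
  | last, x :: xs =>
      (if directions.contains x ∧ some x ≠ last then 1 else 0) + cntA directions (some x) xs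

-- duplicate pairs, remembering the previous element.
def dupsP (directions : List Int) : Option Int → List Int → Int
  | _, [] => 0
  | last, x :: xs =>
      (if some x = last ∧ directions.contains x then 1 else 0) + dupsP directions (some x) xs

theorem foldl_eq_cntA (directions : List Int) (seq : List Int) :
    ∀ (c : Int) (last : Option Int),
      (seq.foldl (fun (st : Int × Option Int) item =>
          (if directions.contains item ∧ some item ≠ st.2 then st.1 + 1 else st.1, some item))
        (c, last)).1 = c + cntA directions last seq := by
  induction seq with
  | nil => intro c last; simp [cntA]
  | cons x xs ih =>
      intro c last
      simp only [List.foldl_cons, cntA, ih]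
      split_ifs <;> ring

theorem cntA_eq_sub (directions : List Int) (seq : List Int) :
    ∀ last : Option Int,
      cntA directions last seq
        = ((seq.filter (fun x => directions.contains x)).length : Int)
          - dupsP directions last seq := by
  induction seq with
  | nil => intro last; simp [cntA, dupsP]
  | cons x xs ih =>
      intro last
      simp only [cntA, dupsP, List.filter_cons, ih, List.contains_eq_mem]
      by_cases hd : x ∈ directions
      · by_cases hl : some x = last
        · simp [hd, hl]; push_cast; ring
        · simp [hd, hl]; push_cast; ring
      · simp [hd]

theorem dupsP_eq_zip (directions : List Int) (xs : List Int) :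
    ∀ a : Int,
      dupsP directions (some a) xs
        = ((((a :: xs).zip xs).filter (fun p => p.1 == p.2 && directions.contains p.2)).length : Int) := by
  induction xs with
  | nil => intro a; simp [dupsP]
  | cons x xs ih =>
      intro a
      simp only [dupsP, List.zip_cons_cons, List.filter_cons, ih x, List.contains_eq_mem]
      by_cases h : a = x
      · subst h
        by_cases hd : a ∈ directions <;> simp [hd] <;> push_cast <;> ring
      · have hne : ¬ (some x = some a) := by simp [Ne.symm h]
        simp [h, hne]

theorem count_ships_spec : Claim_equal_count_ships := by
  intro seq directions _
  unfold Spec_count_ships count_ships count_ships_alt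
  rw [foldl_eq_cntA, cntA_eq_sub]
  cases seq with
  | nil => simp [dupsP]
  | cons x xs => simp [dupsP, dupsP_eq_zip]
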